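-- pv_equiv track=rewrite | github.com/EpsilonLabsInc/InternVL-Epsi | generate_jsonl.py | separate_text
-- ===== SOURCE A (Python) =====
-- def separate_text(text):
--     # Convert the text to lowercase
--     text = text.lower()
--
--     # Split the text into lines
--     lines = text.split("\n")
--
--     # Initialize variables
--     part1 = []
--     part2 = []
--     found_separator = False
--
--     # Loop through the lines and separate the text
--     for line in lines:
--
--         if not line or line.isspace() or line == "\n":
--             continue
--
--         if "findings" in line or "impression" in line:
--             found_separator = True
--         if found_separator:
--             part2.append(line)
--         else:
--             part1.append(line)
--
--     # Join the parts back into strings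
--     part1 = "\n".join(part1).strip()
--     part2 = "\n".join(part2).strip()
--
--     return part1, part2
-- ===== SOURCE B (Python) =====
-- def separate_text(text):
--     filtered = [l for l in text.lower().split("\n") if l and not l.isspace()]
--     idx = next((i for i, l in enumerate(filtered)
--                 if "findings" in l or "impression" in l), len(filtered))
--     return "\n".join(filtered[:idx]).strip(), "\n".join(filtered[idx:]).strip()
-- ===== Notes on version B (the rewrite author's own statement) =====
-- stated objective: simpler
-- what changed: Replaces the stateful loop with a found_separator flag by a filter comprehension, a single next()-search for the first separator line, and two slices joined and stripped.
import Mathlib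
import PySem

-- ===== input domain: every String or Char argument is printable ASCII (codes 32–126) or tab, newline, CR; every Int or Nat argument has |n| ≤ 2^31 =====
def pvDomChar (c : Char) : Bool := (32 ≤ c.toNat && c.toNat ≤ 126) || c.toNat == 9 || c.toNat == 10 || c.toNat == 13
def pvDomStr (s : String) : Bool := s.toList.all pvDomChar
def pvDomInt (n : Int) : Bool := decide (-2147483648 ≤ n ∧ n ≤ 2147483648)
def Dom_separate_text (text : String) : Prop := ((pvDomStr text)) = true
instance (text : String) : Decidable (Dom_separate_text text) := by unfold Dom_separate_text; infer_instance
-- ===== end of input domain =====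

-- B replaces A's stateful loop (found_separator flag) by filter + first-index search + two slices; objective: simpler.

-- ===== PORT A =====
def separate_text (text : String) : String × String :=
  let text := PySem.Str.lower text
  let lines := (PySem.Str.split? text "\n").getD []
  let st := lines.foldl (fun (s : List String × List String × Bool) line =>
      if decide (line = "") || PySem.Str.strIsspace line || decide (line = "\n") then s
      else
        let found := if PySem.Str.isIn "findings" line || PySem.Str.isIn "impression" line
                     then true else s.2.2
        if found then (s.1, s.2.1 ++ [line], found) else (s.1 ++ [line], s.2.1, found))
    ([], [], false)
  (PySem.Str.strip (PySem.Str.join "\n" st.1), PySem.Str.strip (PySem.Str.join "\n" st.2.1))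

-- ===== PORT B =====
def separate_text_alt (text : String) : String × String :=
  let filtered := ((PySem.Str.split? (PySem.Str.lower text) "\n").getD []).filter
      (fun l => !decide (l = "") && !PySem.Str.strIsspace l)
  let idx := match filtered.findIdx?
      (fun l => PySem.Str.isIn "findings" l || PySem.Str.isIn "impression" l) with
    | some i => i
    | none => filtered.length
  (PySem.Str.strip (PySem.Str.join "\n" (filtered.take idx)),
   PySem.Str.strip (PySem.Str.join "\n" (filtered.drop idx)))

-- ===== PRECONDITION & SPEC =====
def Spec_separate_text (text : String) (out : String × String) : Prop := out = separate_text_alt text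
instance (text : String) (out : String × String) : Decidable (Spec_separate_text text out) := by unfold Spec_separate_text; infer_instance

-- ===== CLAIM (what is proved, stated in full; the proofs are below) =====
def Claim_equal_separate_text : Prop := ∀ (text : String), Dom_separate_text text → Spec_separate_text text (separate_text text)

-- ===== LEMMAS AND PROOFS =====

-- the separator predicate
def pvSep (l : String) : Bool := PySem.Str.isIn "findings" l || PySem.Str.isIn "impression" l

def pvIdx (fs : List String) : Nat :=
  match fs.findIdx? pvSep with
  | some i => i
  | none => fs.length

-- A's loop step
def pvStepA (s : List String × List String × Bool) (line : String) :
    List String × List String × Bool :=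
  if decide (line = "") || PySem.Str.strIsspace line || decide (line = "\n") then s
  else
    let found := if pvSep line then true else s.2.2
    if found then (s.1, s.2.1 ++ [line], found) else (s.1 ++ [line], s.2.1, found)

-- with the flag already true, the loop only appends to part2
theorem pvFoldA_true (fs : List String) (p1 p2 : List String)
    (h : ∀ l ∈ fs, (!decide (l = "") && !PySem.Str.strIsspace l) = true) :
    fs.foldl pvStepA (p1, p2, true) = (p1, p2 ++ fs, true) := by
  induction fs generalizing p2 with
  | nil => simp
  | cons l fs ih =>
    have hl := h l (by simp)
    simp only [Bool.and_eq_true, Bool.not_eq_true'] at hl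
    have hln : ¬ (l = "\n") := by
      intro he; subst he; exact absurd hl.2 (by decide)
    simp only [List.foldl_cons, pvStepA, hl.1, hl.2, hln, decide_false, Bool.or_false,
      Bool.false_eq_true, if_false, ite_self]
    rw [if_pos trivial]
    rw [ih _ (fun x hx => h x (by simp [hx]))]
    simp

theorem pvFoldA_false (fs : List String) (p1 : List String)
    (h : ∀ l ∈ fs, (!decide (l = "") && !PySem.Str.strIsspace l) = true) :
    (fs.foldl pvStepA (p1, [], false)).1 = p1 ++ fs.take (pvIdx fs) ∧
    (fs.foldl pvStepA (p1, [], false)).2.1 = fs.drop (pvIdx fs) := by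
  induction fs generalizing p1 with
  | nil => simp [pvIdx]
  | cons l fs ih =>
    have hl := h l (by simp)
    simp only [Bool.and_eq_true, Bool.not_eq_true'] at hl
    have hln : ¬ (l = "\n") := by
      intro he; subst he; exact absurd hl.2 (by decide)
    simp only [List.foldl_cons, pvStepA, hl.1, hl.2, hln, decide_false,
      Bool.or_false, Bool.false_eq_true, if_false]
    by_cases hp : pvSep l = true
    · simp only [hp, if_true]
      rw [pvFoldA_true fs p1 ([] ++ [l]) (fun x hx => h x (by simp [hx]))]
      simp [pvIdx, List.findIdx?_cons, hp]
    · simp only [Bool.not_eq_true] at hp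
      simp only [hp, Bool.false_eq_true, if_false]
      have := ih (p1 ++ [l]) (fun x hx => h x (by simp [hx]))
      simp only [pvIdx, List.findIdx?_cons, hp] at *
      rcases hfi : fs.findIdx? pvSep with _ | i <;>
        simp only [hfi] at this ⊢ <;> simp [this.1, this.2]

-- the filter keeps exactly the lines A's loop does not skip
theorem pvFoldl_eq_filter (lines : List String) :
    lines.foldl pvStepA ([], [], false) =
      (lines.filter (fun l => !decide (l = "") && !PySem.Str.strIsspace l)).foldl pvStepA
        ([], [], false) := by
  rw [List.foldl_filter]
  congr 1
  funext s l
  by_cases hk : (!decide (l = "") && !PySem.Str.strIsspace l) = true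
  · rw [if_pos hk]
  · rw [if_neg hk]
    simp only [Bool.and_eq_true, Bool.not_eq_true', not_and_or, Bool.not_eq_false,
      decide_eq_true_eq] at hk
    unfold pvStepA
    rw [if_pos]
    rcases hk with hk | hk
    · simp [hk]
    · simp only [PySem.Str.strIsspace] at hk
      simp [hk]

theorem pvMain (lines : List String) :
    (PySem.Str.strip (PySem.Str.join "\n" (lines.foldl pvStepA ([], [], false)).1),
     PySem.Str.strip (PySem.Str.join "\n" (lines.foldl pvStepA ([], [], false)).2.1)) =
    (PySem.Str.strip (PySem.Str.join "\n"
       ((lines.filter (fun l => !decide (l = "") && !PySem.Str.strIsspace l)).take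
          (pvIdx (lines.filter (fun l => !decide (l = "") && !PySem.Str.strIsspace l))))),
     PySem.Str.strip (PySem.Str.join "\n"
       ((lines.filter (fun l => !decide (l = "") && !PySem.Str.strIsspace l)).drop
          (pvIdx (lines.filter (fun l => !decide (l = "") && !PySem.Str.strIsspace l)))))) := by
  rw [pvFoldl_eq_filter]
  have hmem : ∀ l ∈ lines.filter (fun l => !decide (l = "") && !PySem.Str.strIsspace l),
      (!decide (l = "") && !PySem.Str.strIsspace l) = true := by
    intro l hl; exact (List.mem_filter.mp hl).2
  have h := pvFoldA_false _ [] hmem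
  rw [h.1, h.2]
  simp

-- ===== VERDICT (by name: the statement is the Claim_ definition above) =====
set_option maxHeartbeats 1000000 in
theorem separate_text_spec : Claim_equal_separate_text := by
  intro text _
  exact pvMain ((PySem.Str.split? (PySem.Str.lower text) "\n").getD [])
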